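-- pv_equiv track=rewrite | github.com/ellismckenzielee/codewars-python | simple_fun_112_array_erasing.py | array_erasing
-- ===== SOURCE A (Python) =====
-- from itertools import groupby, chain
--
-- def array_erasing(lst):
--     runs = 0
--     while lst:
--         groups = [list(g) for _, g in groupby(lst)]
--         candidates = [i for i, g in enumerate(groups) if len(g) > 1]
--         i = min(candidates, key=lambda k:abs(len(groups)/2-k)) if candidates else len(groups)//2
--         lst = list(chain.from_iterable(groups[:i] + groups[i+1:]))
--         runs += 1
--     return runs
-- ===== SOURCE B (Python) =====
-- def array_erasing(lst):
--     # Boolean run abstraction: only a run's value and whether its length exceeds 1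
--     # ever matter (a merged run is always "big"), so counts are never stored.
--     runs = []
--     for x in lst:
--         if runs and runs[-1][0] == x:
--             runs[-1] = (x, True)
--         else:
--             runs.append((x, False))
--     rounds = 0
--     while runs:
--         m = len(runs)
--         c = m // 2
--         # middle-out probe: first big run at minimal distance from m/2, left of a tie first
--         i = c
--         if not runs[c][1]:
--             i = None
--             for d in range(m):
--                 left = c - d
--                 right = c + d if m % 2 == 0 else c + d + 1
--                 if 0 <= left < m and runs[left][1]:
--                     i = left
--                     break
--                 if 0 <= right < m and runs[right][1]:
--                     i = right
--                     break
--             if i is None: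
--                 i = c
--         # delete run i; the two newly adjacent runs merge when their values agree
--         if 0 < i < m - 1 and runs[i - 1][0] == runs[i + 1][0]:
--             runs[i - 1:i + 2] = [(runs[i + 1][0], True)]
--         else:
--             del runs[i]
--         rounds += 1
--     return rounds
-- ===== Notes on version B (the rewrite author's own statement) =====
-- stated objective: faster
-- what changed: B abstracts the list once into runs carrying only (value, length>1) - counts are discarded because a merged run is always 'big' - then each round picks the run to erase by a middle-out probe from the centre (no candidate list, no keyed minimum) and splices the state with a single-junction merge, instead of A's per-round reflatten+regroup plus min-with-key over an enumerated candidate list.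
import Mathlib
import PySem

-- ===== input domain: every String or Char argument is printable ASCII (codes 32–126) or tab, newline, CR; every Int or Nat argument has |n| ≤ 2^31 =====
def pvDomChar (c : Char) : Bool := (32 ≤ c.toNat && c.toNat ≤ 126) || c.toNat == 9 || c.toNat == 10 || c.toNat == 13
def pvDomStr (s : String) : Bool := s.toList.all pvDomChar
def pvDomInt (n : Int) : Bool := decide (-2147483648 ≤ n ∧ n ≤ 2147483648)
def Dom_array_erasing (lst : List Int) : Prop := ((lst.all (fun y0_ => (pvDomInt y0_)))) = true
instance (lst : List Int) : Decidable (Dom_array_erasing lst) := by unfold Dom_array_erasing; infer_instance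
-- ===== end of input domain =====

-- B abstracts each run to (value, length>1) — run counts are never stored — and finds
-- the run to erase by a middle-out probe instead of building a candidate list and
-- taking a keyed minimum (objective: faster).

-- ===== PORT A =====
-- `min(candidates, key=lambda k: abs(len(groups)/2 - k))`, first minimal element.
-- Exact: the float key abs(n/2-k) compares exactly like the integer |n - 2k|.
def pvKey (n k : Nat) : Nat := ((n : Int) - 2 * (k : Int)).natAbs

def pvPickMin (n : Nat) : List Nat → Nat
  | [] => 0
  | c :: rest => rest.foldl (fun b k => if pvKey n k < pvKey n b then k else b) c

-- `[list(g) for _, g in groupby(lst)]`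
def pvGroupby : List Int → List (List Int)
  | [] => []
  | x :: xs => (x :: xs.takeWhile (· == x)) :: pvGroupby (xs.dropWhile (· == x))
termination_by l => l.length
decreasing_by
  have := List.length_dropWhile_le (· == x) xs; simp; omega

def pvLoopA : Nat → List Int → Int → Int
  | 0, _, acc => acc
  | _ + 1, [], acc => acc
  | f + 1, x :: xs, acc =>
    let groups := pvGroupby (x :: xs)
    let n := groups.length
    let cands := (groups.zipIdx.filter (fun p => 1 < p.1.length)).map (·.2)
    let i := if cands.isEmpty then n / 2 else pvPickMin n cands
    pvLoopA f ((groups.take i ++ groups.drop (i + 1)).flatten) (acc + 1)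

def array_erasing (lst : List Int) : Int := pvLoopA lst.length lst 0

-- ===== PORT B =====
-- `runs[k][1]` / `runs[k][0]` after the explicit `0 <= k < m` range checks of Source B
def pvFlagN (rs : List (Int × Bool)) (k : Nat) : Bool := (rs[k]?.elim false (·.2))
def pvValN (rs : List (Int × Bool)) (k : Nat) : Int := (rs[k]?.elim 0 (·.1))

-- the `for d in range(m)` middle-out probe of Source B (fuel = remaining iterations)
def pvProbe (rs : List (Int × Bool)) (m c : Nat) : Nat → Nat → Option Nat
  | 0, _ => none
  | fuel + 1, d =>
    let left : Int := (c : Int) - (d : Int)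
    let right : Int := if m % 2 == 0 then (c : Int) + (d : Int) else (c : Int) + (d : Int) + 1
    if 0 ≤ left ∧ left < (m : Int) ∧ pvFlagN rs left.toNat = true then some left.toNat
    else if 0 ≤ right ∧ right < (m : Int) ∧ pvFlagN rs right.toNat = true then some right.toNat
    else pvProbe rs m c fuel (d + 1)

-- `i = c; if not runs[c][1]: … probe …; if i is None: i = c`
def pvSelect (rs : List (Int × Bool)) (m c : Nat) : Nat :=
  if pvFlagN rs c then c
  else match pvProbe rs m c m 0 with
    | some i => i
    | none => c

-- `runs[i-1:i+2] = [(v, True)]` when the neighbours of the deleted run agree, else `del runs[i]`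
def pvDelMerge (rs : List (Int × Bool)) (i m : Nat) : List (Int × Bool) :=
  if 0 < i ∧ i < m - 1 ∧ pvValN rs (i - 1) = pvValN rs (i + 1) then
    rs.take (i - 1) ++ (pvValN rs (i + 1), true) :: rs.drop (i + 2)
  else rs.take i ++ rs.drop (i + 1)

-- the run-building `for x in lst` of Source B: extend-or-open a run at the right end
def pvStepB (runs : List (Int × Bool)) (x : Int) : List (Int × Bool) :=
  match runs.getLast? with
  | some a => if a.1 = x then runs.dropLast ++ [(x, true)] else runs ++ [(x, false)]
  | none => [(x, false)]

def pvLoopB : Nat → List (Int × Bool) → Int → Int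
  | 0, _, acc => acc
  | _ + 1, [], acc => acc
  | f + 1, a :: rs, acc =>
    let m := (a :: rs).length
    let c := m / 2
    let i := pvSelect (a :: rs) m c
    pvLoopB f (pvDelMerge (a :: rs) i m) (acc + 1)

def array_erasing_alt (lst : List Int) : Int := pvLoopB lst.length (lst.foldl pvStepB []) 0

-- ===== PRECONDITION & SPEC =====
def Spec_array_erasing (lst : List Int) (out : Int) : Prop := out = array_erasing_alt lst
instance (lst : List Int) (out : Int) : Decidable (Spec_array_erasing lst out) := by unfold Spec_array_erasing; infer_instance

-- ===== CLAIM (what is proved, stated in full; the proofs are below) =====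
def Claim_equal_array_erasing : Prop := ∀ (lst : List Int), Dom_array_erasing lst → Spec_array_erasing lst (array_erasing lst)

-- ===== LEMMAS AND PROOFS =====

-- exact run-length decomposition used to relate the two ports
def pvBuildRuns : List Int → List (Int × Nat)
  | [] => []
  | x :: xs => (x, 1 + (xs.takeWhile (· == x)).length) :: pvBuildRuns (xs.dropWhile (· == x))
termination_by l => l.length
decreasing_by
  have := List.length_dropWhile_le (· == x) xs; simp; omega

def pvAbs (p : Int × Nat) : Int × Bool := (p.1, decide (1 < p.2))

def pvRepl (p : Int × Nat) : List Int := List.replicate p.2 p.1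

def pvFlat (rs : List (Int × Nat)) : List Int := (rs.map pvRepl).flatten

-- the single-junction merge, stated on exact runs
def pvMJ (l r : List (Int × Nat)) : List (Int × Nat) :=
  match l.getLast?, r.head? with
  | some a, some b =>
    if a.1 = b.1 then l.dropLast ++ (a.1, a.2 + b.2) :: r.tail else l ++ r
  | _, _ => l ++ r

theorem pv_tw_repl (xs : List Int) (x : Int) :
    xs.takeWhile (· == x) = List.replicate (xs.takeWhile (· == x)).length x := by
  induction xs with
  | nil => rfl
  | cons y ys ih =>
    by_cases h : y = x
    · subst h; simp [List.replicate_succ] at *; exact ih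
    · simp [h]

theorem pv_groupby_eq (lst : List Int) : pvGroupby lst = (pvBuildRuns lst).map pvRepl := by
  induction lst using pvBuildRuns.induct with
  | case1 => simp [pvGroupby, pvBuildRuns]
  | case2 x xs ih =>
    rw [pvGroupby, pvBuildRuns]
    simp only [List.map_cons, pvRepl, ih]
    congr 1
    rw [Nat.add_comm, List.replicate_succ]
    exact congrArg (List.cons x) (pv_tw_repl xs x)

theorem pv_head_val (lst : List Int) : (pvBuildRuns lst).head?.map (·.1) = lst.head? := by
  cases lst with
  | nil => simp [pvBuildRuns]
  | cons x xs => rw [pvBuildRuns]; rfl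

theorem pv_head_dropWhile (p : Int → Bool) (xs : List Int) (y : Int)
    (h : (xs.dropWhile p).head? = some y) : p y = false := by
  induction xs with
  | nil => simp at h
  | cons a l ih =>
    rw [List.dropWhile_cons] at h
    split at h
    · exact ih h
    · simp_all

theorem pv_chain_buildRuns (lst : List Int) :
    (pvBuildRuns lst).IsChain (fun a b => a.1 ≠ b.1) := by
  induction lst using pvBuildRuns.induct with
  | case1 => rw [pvBuildRuns]; exact List.isChain_nil
  | case2 x xs ih =>
    rw [pvBuildRuns]
    refine List.isChain_cons.2 ⟨?_, ih⟩
    intro y hy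
    have hv := pv_head_val (xs.dropWhile (· == x))
    rw [hy] at hv
    have : (xs.dropWhile (· == x)).head? = some y.1 := by simpa using hv.symm
    have hfalse := pv_head_dropWhile _ _ _ this
    have hne : y.1 ≠ x := by simpa using hfalse
    exact fun h => hne h.symm

theorem pv_pos_buildRuns (lst : List Int) :
    ∀ p ∈ pvBuildRuns lst, 0 < p.2 := by
  induction lst using pvBuildRuns.induct with
  | case1 => simp [pvBuildRuns]
  | case2 x xs ih =>
    rw [pvBuildRuns]
    intro p hp
    rw [List.mem_cons] at hp
    rcases hp with rfl | hp
    · simp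
    · exact ih p hp

theorem pv_flat_cons_head (v : Int) (c : Nat) (r : List (Int × Nat)) (hc : 0 < c) :
    (pvFlat ((v, c) :: r)).head? = some v := by
  obtain ⟨c', rfl⟩ : ∃ c', c = c' + 1 := ⟨c - 1, by omega⟩
  simp [pvFlat, pvRepl, List.replicate_succ]

theorem pv_tw_app (v : Int) (k : Nat) (rest : List Int) :
    (List.replicate k v ++ rest).takeWhile (· == v) = List.replicate k v ++ rest.takeWhile (· == v) := by
  induction k with
  | zero => simp
  | succ n ih => simp [List.replicate_succ, ih]

theorem pv_dw_app (v : Int) (k : Nat) (rest : List Int) :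
    (List.replicate k v ++ rest).dropWhile (· == v) = rest.dropWhile (· == v) := by
  induction k with
  | zero => simp
  | succ n ih => simp [List.replicate_succ, ih]

theorem pv_S (v : Int) (k : Nat) (rest : List Int)
    (h : ∀ y, rest.head? = some y → y ≠ v) :
    pvBuildRuns (List.replicate (k + 1) v ++ rest) = (v, k + 1) :: pvBuildRuns rest := by
  have htw : rest.takeWhile (· == v) = [] := by
    cases rest with
    | nil => rfl
    | cons y ys =>
      have : y ≠ v := h y rfl
      simp [this]
  have hdw : rest.dropWhile (· == v) = rest := by
    cases rest with
    | nil => rfl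
    | cons y ys =>
      have : y ≠ v := h y rfl
      simp [this]
  rw [List.replicate_succ, List.cons_append, pvBuildRuns]
  rw [pv_tw_app, pv_dw_app, htw, hdw]
  simp
  omega

theorem pv_BR (rs : List (Int × Nat)) (hc : rs.IsChain (fun a b => a.1 ≠ b.1))
    (hp : ∀ p ∈ rs, 0 < p.2) : pvBuildRuns (pvFlat rs) = rs := by
  induction rs with
  | nil => simp [pvFlat, pvBuildRuns]
  | cons a r' ih =>
    obtain ⟨v, c⟩ := a
    obtain ⟨c', rfl⟩ : ∃ c', c = c' + 1 := ⟨c - 1, by have := hp (v, c) (by simp); omega⟩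
    have hflat : pvFlat ((v, c' + 1) :: r') = List.replicate (c' + 1) v ++ pvFlat r' := by
      simp [pvFlat, pvRepl]
    rw [hflat, pv_S]
    · rw [ih (List.IsChain.tail hc) (fun p hpm => hp p (by simp [hpm]))]
    · intro y hy
      cases r' with
      | nil => simp [pvFlat] at hy
      | cons b r'' =>
        obtain ⟨w, d⟩ := b
        have hd : 0 < d := hp (w, d) (by simp)
        rw [pv_flat_cons_head w d r'' hd] at hy
        have hne : v ≠ w := (List.isChain_cons.1 hc).1 (w, d) rfl
        obtain rfl : w = y := by injection hy
        exact fun h => hne h.symm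

theorem pv_mj_cons (a : Int × Nat) (l r : List (Int × Nat)) (hl : l ≠ []) :
    pvMJ (a :: l) r = a :: pvMJ l r := by
  obtain ⟨b, l', rfl⟩ := List.exists_cons_of_ne_nil hl
  cases r with
  | nil => simp [pvMJ]
  | cons y r' =>
    rw [pvMJ, pvMJ]
    simp only [List.getLast?_cons_cons, List.head?_cons]
    cases hg : (b :: l').getLast? with
    | none => simp at hg
    | some g =>
      simp only
      split_ifs with h
      · simp [List.dropLast_cons₂]
      · simp

theorem pv_M (l r : List (Int × Nat))
    (hcl : l.IsChain (fun a b => a.1 ≠ b.1)) (hcr : r.IsChain (fun a b => a.1 ≠ b.1))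
    (hpl : ∀ p ∈ l, 0 < p.2) (hpr : ∀ p ∈ r, 0 < p.2) :
    pvBuildRuns (pvFlat l ++ pvFlat r) = pvMJ l r := by
  induction l with
  | nil =>
    simp [pvFlat, pvMJ]
    exact pv_BR r hcr hpr
  | cons a l' ih =>
    obtain ⟨v, c⟩ := a
    obtain ⟨c', rfl⟩ : ∃ c', c = c' + 1 := ⟨c - 1, by have := hpl (v, c) (by simp); omega⟩
    cases l' with
    | cons b l'' =>
      have hflat : pvFlat ((v, c' + 1) :: b :: l'') ++ pvFlat r
          = List.replicate (c' + 1) v ++ (pvFlat (b :: l'') ++ pvFlat r) := by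
        simp [pvFlat, pvRepl]
      rw [hflat, pv_S, pv_mj_cons (v, c' + 1) (b :: l'') r (by simp),
        ih (List.IsChain.tail hcl) (fun p hpm => hpl p (by simp [hpm]))]
      intro y hy
      obtain ⟨w, d⟩ := b
      have hd : 0 < d := hpl (w, d) (by simp)
      rw [List.head?_append_of_ne_nil, pv_flat_cons_head w d l'' hd] at hy
      · have hne : v ≠ w := (List.isChain_cons.1 hcl).1 (w, d) rfl
        obtain rfl : w = y := by injection hy
        exact fun h => hne h.symm
      · have : pvFlat ((w, d) :: l'') ≠ [] := by
          intro hnil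
          have := pv_flat_cons_head w d l'' hd
          rw [hnil] at this; simp at this
        exact this
    | nil =>
      cases r with
      | nil =>
        have : pvFlat [(v, c' + 1)] ++ pvFlat ([] : List (Int × Nat))
            = List.replicate (c' + 1) v ++ pvFlat ([] : List (Int × Nat)) := by
          simp [pvFlat, pvRepl]
        rw [this, pv_S]
        · simp [pvFlat, pvBuildRuns, pvMJ]
        · intro y hy; simp [pvFlat] at hy
      | cons b r' =>
        obtain ⟨w, d⟩ := b
        have hd : 0 < d := hpr (w, d) (by simp)
        by_cases hvw : v = w
        · subst hvw
          have hflat : pvFlat [(v, c' + 1)] ++ pvFlat ((v, d) :: r')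
              = List.replicate (c' + 1 + d) v ++ pvFlat r' := by
            simp [pvFlat, pvRepl, List.replicate_add]
          obtain ⟨d', rfl⟩ : ∃ d', d = d' + 1 := ⟨d - 1, by omega⟩
          have : c' + 1 + (d' + 1) = (c' + 1 + d') + 1 := by omega
          rw [hflat, this, pv_S]
          · rw [pv_BR r' (List.IsChain.tail hcr) (fun p hpm => hpr p (by simp [hpm]))]
            simp [pvMJ]
            omega
          · intro y hy
            cases r' with
            | nil => simp [pvFlat] at hy
            | cons e r'' =>
              obtain ⟨u, f⟩ := e
              have hf : 0 < f := hpr (u, f) (by simp)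
              rw [pv_flat_cons_head u f r'' hf] at hy
              have hne : v ≠ u := (List.isChain_cons.1 hcr).1 (u, f) rfl
              obtain rfl : u = y := by injection hy
              exact fun h => hne h.symm
        · have hflat : pvFlat [(v, c' + 1)] ++ pvFlat ((w, d) :: r')
              = List.replicate (c' + 1) v ++ pvFlat ((w, d) :: r') := by
            simp [pvFlat, pvRepl]
          rw [hflat, pv_S]
          · rw [pv_BR ((w, d) :: r') hcr hpr]
            simp [pvMJ, hvw]
          · intro y hy
            rw [pv_flat_cons_head w d r' hd] at hy
            obtain rfl : w = y := by injection hy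
            exact fun h => hvw h.symm

-- ---- B's fold-built runs are the abstraction of the exact runs ----

theorem pv_step_same (pref : List (Int × Bool)) (v : Int) (b : Bool) :
    pvStepB (pref ++ [(v, b)]) v = pref ++ [(v, true)] := by
  simp [pvStepB]

theorem pv_step_diff (pref : List (Int × Bool)) (v : Int) (b : Bool) (x : Int) (h : v ≠ x) :
    pvStepB (pref ++ [(v, b)]) x = pref ++ [(v, b), (x, false)] := by
  simp [pvStepB, h]

theorem pv_fold_repl (k : Nat) : ∀ (pref : List (Int × Bool)) (v : Int) (b : Bool) (rest : List Int),
    List.foldl pvStepB (pref ++ [(v, b)]) (List.replicate k v ++ rest)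
      = List.foldl pvStepB (pref ++ [(v, b || decide (0 < k))]) rest := by
  induction k with
  | zero => intro pref v b rest; simp
  | succ n ih =>
    intro pref v b rest
    rw [List.replicate_succ, List.cons_append, List.foldl_cons, pv_step_same, ih]
    simp

theorem pv_fold_main (lst : List Int) : ∀ (pref : List (Int × Bool)) (v : Int) (b : Bool),
    (∀ y, lst.head? = some y → y ≠ v) →
    List.foldl pvStepB (pref ++ [(v, b)]) lst = pref ++ (v, b) :: (pvBuildRuns lst).map pvAbs := by
  induction lst using pvBuildRuns.induct with
  | case1 => intro pref v b _; simp [pvBuildRuns]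
  | case2 x xs ih =>
    intro pref v b h
    have hxv : v ≠ x := fun he => (h x rfl) he.symm
    rw [List.foldl_cons, pv_step_diff pref v b x hxv]
    have hdec : xs = List.replicate (xs.takeWhile (· == x)).length x ++ xs.dropWhile (· == x) := by
      conv_lhs => rw [← List.takeWhile_append_dropWhile (p := (· == x)) (l := xs)]
      rw [← pv_tw_repl]
    have : pref ++ [(v, b), (x, false)] = (pref ++ [(v, b)]) ++ [(x, false)] := by simp
    rw [this]
    conv_lhs => rw [hdec]
    rw [pv_fold_repl, ih]
    · rw [pvBuildRuns]
      simp [pvAbs]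
    · intro y hy
      have := pv_head_dropWhile (· == x) xs y hy
      simpa using this

theorem pv_build_fold_eq (lst : List Int) :
    lst.foldl pvStepB [] = (pvBuildRuns lst).map pvAbs := by
  cases lst with
  | nil => simp [pvBuildRuns]
  | cons x xs =>
    have h0 : pvStepB [] x = [] ++ [(x, false)] := by simp [pvStepB]
    rw [List.foldl_cons, h0]
    have hdec : xs = List.replicate (xs.takeWhile (· == x)).length x ++ xs.dropWhile (· == x) := by
      conv_lhs => rw [← List.takeWhile_append_dropWhile (p := (· == x)) (l := xs)]
      rw [← pv_tw_repl]
    conv_lhs => rw [hdec]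
    rw [pv_fold_repl, pv_fold_main]
    · rw [pvBuildRuns]
      simp [pvAbs]
    · intro y hy
      have := pv_head_dropWhile (· == x) xs y hy
      simpa using this

-- ---- selection equality ----

def pvOrdLe (m r k : Nat) : Prop := pvKey m r < pvKey m k ∨ (pvKey m r = pvKey m k ∧ r ≤ k)

def pvCands (rs : List (Int × Nat)) : List Nat :=
  ((rs.map pvRepl).zipIdx.filter (fun p => 1 < p.1.length)).map (·.2)

theorem pv_flag_map (rs : List (Int × Nat)) (k : Nat) :
    pvFlagN (rs.map pvAbs) k = (rs[k]?.elim false (fun q => decide (1 < q.2))) := by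
  simp only [pvFlagN, List.getElem?_map]
  cases rs[k]? <;> simp [pvAbs]

theorem pv_flag_lt (rs : List (Int × Nat)) (k : Nat)
    (h : pvFlagN (rs.map pvAbs) k = true) : k < rs.length := by
  by_contra hk
  rw [pv_flag_map] at h
  rw [List.getElem?_eq_none (by omega)] at h
  simp at h

theorem pv_cands_mem (rs : List (Int × Nat)) (k : Nat) :
    k ∈ pvCands rs ↔ pvFlagN (rs.map pvAbs) k = true := by
  rw [pv_flag_map]
  simp only [pvCands, List.mem_map, List.mem_filter]
  constructor
  · rintro ⟨⟨p, j⟩, ⟨hmem, hlen⟩, rfl⟩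
    have := List.mk_mem_zipIdx_iff_getElem?.1 hmem
    rw [List.getElem?_map] at this
    cases hq : rs[j]? with
    | none => rw [hq] at this; simp at this
    | some q =>
      rw [hq] at this
      simp at this
      subst this
      simp at hlen
      simp [pvRepl] at hlen ⊢
      omega
  · intro h
    cases hq : rs[k]? with
    | none => rw [hq] at h; simp at h
    | some q =>
      rw [hq] at h
      simp at h
      refine ⟨(pvRepl q, k), ⟨List.mk_mem_zipIdx_iff_getElem?.2 ?_, ?_⟩, rfl⟩
      · rw [List.getElem?_map, hq]; rfl
      · simp [pvRepl]; omega

theorem pv_cands_pairwise (rs : List (Int × Nat)) : (pvCands rs).Pairwise (· < ·) := by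
  have h1 : (pvCands rs).Sublist (((rs.map pvRepl).zipIdx).map (·.2)) :=
    List.Sublist.map _ List.filter_sublist
  have h2 : (((rs.map pvRepl).zipIdx).map (·.2)) = List.range' 0 (rs.map pvRepl).length := by
    exact List.zipIdx_map_snd 0 (rs.map pvRepl)
  refine List.Pairwise.sublist h1 ?_
  rw [h2]
  exact List.pairwise_lt_range' 1

theorem pv_pick_char (m : Nat) (l : List Nat) : ∀ (b : Nat), (∀ k ∈ l, b < k) → l.Pairwise (· < ·) →
    (List.foldl (fun b k => if pvKey m k < pvKey m b then k else b) b l ∈ b :: l) ∧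
    ∀ k ∈ b :: l, pvOrdLe m (List.foldl (fun b k => if pvKey m k < pvKey m b then k else b) b l) k := by
  induction l with
  | nil =>
    intro b _ _
    constructor
    · simp
    · intro k hk
      simp at hk
      subst hk
      exact Or.inr ⟨rfl, le_refl _⟩
  | cons a l' ih =>
    intro b hb hp
    have hba : b < a := hb a (by simp)
    rw [List.foldl_cons]
    by_cases hlt : pvKey m a < pvKey m b
    · rw [if_pos hlt]
      obtain ⟨hmem, hmin⟩ := ih a (fun j hj => (List.pairwise_cons.1 hp).1 j hj) (List.pairwise_cons.1 hp).2
      constructor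
      · rcases List.mem_cons.1 hmem with h | h
        · simp [h]
        · simp [h]
      · intro k hk
        rcases List.mem_cons.1 hk with rfl | hk
        · have := hmin a (by simp)
          unfold pvOrdLe at this ⊢
          omega
        · exact hmin k hk
    · rw [if_neg hlt]
      obtain ⟨hmem, hmin⟩ := ih b (fun j hj => lt_trans hba ((List.pairwise_cons.1 hp).1 j hj)) (List.pairwise_cons.1 hp).2
      constructor
      · rcases List.mem_cons.1 hmem with h | h
        · simp [h]
        · simp [h]
      · intro k hk
        rcases List.mem_cons.1 hk with rfl | hk
        · exact hmin k (by simp)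
        · rcases List.mem_cons.1 hk with rfl | hk
          · have hrb := hmin b (by simp)
            unfold pvOrdLe at hrb ⊢
            rcases hrb with h | ⟨he, hle⟩
            · left; omega
            · by_cases hek : pvKey m b = pvKey m k
              · right; exact ⟨by omega, by omega⟩
              · left; omega
          · exact hmin k (by simp [hk])

theorem pv_probe_none (rs' : List (Int × Bool)) (m c : Nat)
    (h : ∀ k, pvFlagN rs' k = false) : ∀ (fuel d : Nat), pvProbe rs' m c fuel d = none := by
  intro fuel
  induction fuel with
  | zero => intro d; rfl
  | succ f ih =>
    intro d
    simp only [pvProbe]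
    rw [if_neg, if_neg]
    · exact ih (d + 1)
    · rintro ⟨_, _, hf⟩; rw [h] at hf; simp at hf
    · rintro ⟨_, _, hf⟩; rw [h] at hf; simp at hf

theorem pv_right_ite (m c d : Nat) :
    (if (m % 2 == 0) = true then (c : Int) + (d : Int) else (c : Int) + (d : Int) + 1)
      = (c : Int) + (d : Int) + ((m % 2 : Nat) : Int) := by
  rcases Nat.mod_two_eq_zero_or_one m with h | h <;> simp [h]

theorem pv_probe_some (rs' : List (Int × Bool)) (m c : Nat) (hm : m = rs'.length)
    (hc : c = m / 2) (h0 : 0 < m) :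
    ∀ (fuel d : Nat), m ≤ fuel + d →
    (∀ k, k < m → pvFlagN rs' k = true → 2 * d + m % 2 ≤ pvKey m k) →
    (∃ k, k < m ∧ pvFlagN rs' k = true) →
    ∃ r, pvProbe rs' m c fuel d = some r ∧ r < m ∧ pvFlagN rs' r = true ∧
      ∀ k, k < m → pvFlagN rs' k = true → pvOrdLe m r k := by
  intro fuel
  induction fuel with
  | zero =>
    rintro d hfd hlow ⟨k, hk, hf⟩
    exfalso
    have := hlow k hk hf
    unfold pvKey at this
    omega
  | succ f ih =>
    rintro d hfd hlow hex
    simp only [pvProbe]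
    rw [pv_right_ite m c d]
    split_ifs with h1 h2
    · obtain ⟨hl0, hlm, hlf⟩ := h1
      refine ⟨((c : Int) - (d : Int)).toNat, rfl, by omega, hlf, ?_⟩
      intro k hk hkf
      have hKk := hlow k hk hkf
      unfold pvOrdLe pvKey at *
      omega
    · obtain ⟨hr0, hrm, hrf⟩ := h2
      refine ⟨((c : Int) + (d : Int) + ((m % 2 : Nat) : Int)).toNat, rfl, by omega, hrf, ?_⟩
      intro k hk hkf
      have hKk := hlow k hk hkf
      by_cases hkL : (k : Int) = (c : Int) - (d : Int)
      · exfalso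
        apply h1
        refine ⟨by omega, by omega, ?_⟩
        have h' : ((c : Int) - (d : Int)).toNat = k := by omega
        rw [h']; exact hkf
      · unfold pvOrdLe pvKey at *
        omega
    · refine ih (d + 1) (by omega) ?_ hex
      intro k hk hkf
      have hKk := hlow k hk hkf
      by_cases hkL : (k : Int) = (c : Int) - (d : Int)
      · exfalso
        apply h1
        refine ⟨by omega, by omega, ?_⟩
        have h' : ((c : Int) - (d : Int)).toNat = k := by omega
        rw [h']; exact hkf
      · by_cases hkR : (k : Int) = (c : Int) + (d : Int) + ((m % 2 : Nat) : Int)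
        · exfalso
          apply h2
          refine ⟨by omega, by omega, ?_⟩
          have h' : ((c : Int) + (d : Int) + ((m % 2 : Nat) : Int)).toNat = k := by omega
          rw [h']; exact hkf
        · unfold pvKey at *
          omega

theorem pv_sel_eq (rs : List (Int × Nat)) (hne : rs ≠ []) :
    pvSelect (rs.map pvAbs) rs.length (rs.length / 2)
      = (if ((rs.map pvRepl).zipIdx.filter (fun p => 1 < p.1.length)).map (·.2) |>.isEmpty
          then rs.length / 2
          else pvPickMin rs.length (((rs.map pvRepl).zipIdx.filter (fun p => 1 < p.1.length)).map (·.2))) := by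
  have h0 : 0 < rs.length := List.length_pos_iff.2 hne
  show pvSelect (rs.map pvAbs) rs.length (rs.length / 2)
      = (if (pvCands rs).isEmpty then rs.length / 2 else pvPickMin rs.length (pvCands rs))
  cases hcs : pvCands rs with
  | nil =>
    have hnf : ∀ k, pvFlagN (rs.map pvAbs) k = false := by
      intro k
      by_contra h
      have : pvFlagN (rs.map pvAbs) k = true := by
        cases hb : pvFlagN (rs.map pvAbs) k
        · exact absurd hb h
        · rfl
      have := (pv_cands_mem rs k).2 this
      rw [hcs] at this
      simp at this
    unfold pvSelect
    rw [if_neg (by rw [hnf]; simp), pv_probe_none _ _ _ hnf]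
    simp
  | cons a l =>
    have hpw := pv_cands_pairwise rs
    rw [hcs] at hpw
    obtain ⟨hmem, hmin⟩ := pv_pick_char rs.length l a (List.pairwise_cons.1 hpw).1 (List.pairwise_cons.1 hpw).2
    have hrmem : (List.foldl (fun b k => if pvKey rs.length k < pvKey rs.length b then k else b) a l) ∈ pvCands rs := by
      rw [hcs]; exact hmem
    set r := List.foldl (fun b k => if pvKey rs.length k < pvKey rs.length b then k else b) a l with hr
    have hrflag : pvFlagN (rs.map pvAbs) r = true := (pv_cands_mem rs r).1 hrmem
    have hrlt : r < rs.length := by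
      have := pv_flag_lt rs r hrflag
      simpa using this
    have hrmin : ∀ k, k < rs.length → pvFlagN (rs.map pvAbs) k = true → pvOrdLe rs.length r k := by
      intro k _ hkf
      have : k ∈ pvCands rs := (pv_cands_mem rs k).2 hkf
      rw [hcs] at this
      exact hmin k this
    have hrhs : (if (a :: l).isEmpty = true then rs.length / 2 else pvPickMin rs.length (a :: l)) = r := by
      simp [pvPickMin, hr]
    rw [hrhs]
    unfold pvSelect
    by_cases hfc : pvFlagN (rs.map pvAbs) (rs.length / 2) = true
    · rw [if_pos hfc]
      have h1 := hrmin (rs.length / 2) (by omega) hfc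
      have h2 : pvOrdLe rs.length (rs.length / 2) r := by
        unfold pvOrdLe pvKey
        omega
      unfold pvOrdLe pvKey at h1 h2
      omega
    · rw [if_neg hfc]
      have hlen : rs.length = (rs.map pvAbs).length := by simp
      obtain ⟨r', hpr, hr'm, hr'f, hr'min⟩ :=
        pv_probe_some (rs.map pvAbs) rs.length (rs.length / 2) hlen rfl h0 rs.length 0
          (by omega)
          (by intro k _ _; unfold pvKey; omega)
          ⟨r, hrlt, hrflag⟩
      rw [hpr]
      show r' = r
      have ha := hr'min r hrlt hrflag
      have hb := hrmin r' hr'm hr'f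
      unfold pvOrdLe pvKey at ha hb
      omega

-- ---- deletion/merge equality ----

theorem pv_valN_eq (rs : List (Int × Nat)) (k : Nat) (hk : k < rs.length) :
    pvValN (rs.map pvAbs) k = (rs[k]'hk).1 := by
  simp [pvValN, List.getElem?_map, List.getElem?_eq_getElem hk, pvAbs]

theorem pv_mj_concat_cons (A : List (Int × Nat)) (a b : Int × Nat) (B : List (Int × Nat)) :
    pvMJ (A ++ [a]) (b :: B)
      = if a.1 = b.1 then A ++ (a.1, a.2 + b.2) :: B else (A ++ [a]) ++ b :: B := by
  unfold pvMJ
  simp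

theorem pv_del_eq (rs : List (Int × Nat)) (i : Nat) (hi : i < rs.length)
    (hp : ∀ p ∈ rs, 0 < p.2) :
    (pvMJ (rs.take i) (rs.drop (i + 1))).map pvAbs
      = pvDelMerge (rs.map pvAbs) i rs.length := by
  by_cases hi0 : i = 0
  · subst hi0
    have hmj : pvMJ (rs.take 0) (rs.drop 1) = rs.drop 1 := by
      simp [pvMJ]
    rw [hmj]
    unfold pvDelMerge
    rw [if_neg (by rintro ⟨h, _, _⟩; omega)]
    simp
  · by_cases hil : i + 1 < rs.length
    · have h1 : rs.take i = rs.take (i - 1) ++ [rs[i - 1]'(by omega)] := by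
        conv_lhs => rw [show i = (i - 1) + 1 by omega]
        rw [List.take_add_one, List.getElem?_eq_getElem (by omega)]
        rfl
      have h2 : rs.drop (i + 1) = rs[i + 1]'hil :: rs.drop (i + 2) := by
        rw [List.drop_eq_getElem_cons hil]
      have ha2 : 0 < (rs[i - 1]'(by omega)).2 := hp _ (List.getElem_mem _)
      have hb2 : 0 < (rs[i + 1]'hil).2 := hp _ (List.getElem_mem _)
      rw [h1, h2, pv_mj_concat_cons]
      by_cases hv : (rs[i - 1]'(by omega)).1 = (rs[i + 1]'hil).1
      · rw [if_pos hv]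
        unfold pvDelMerge
        rw [if_pos ⟨by omega, by omega, by
          rw [pv_valN_eq rs (i - 1) (by omega), pv_valN_eq rs (i + 1) hil]; exact hv⟩]
        rw [pv_valN_eq rs (i + 1) hil]
        simp only [List.map_append, List.map_cons, List.map_take, List.map_drop, pvAbs]
        rw [← hv]
        congr 2
        simp
        omega
      · rw [if_neg hv]
        unfold pvDelMerge
        rw [if_neg (by
          rintro ⟨_, _, hveq⟩
          rw [pv_valN_eq rs (i - 1) (by omega), pv_valN_eq rs (i + 1) hil] at hveq
          exact hv hveq)]
        rw [← h1, ← h2]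
        simp [List.map_take]
    · have hdrop : rs.drop (i + 1) = [] := by
        rw [List.drop_eq_nil_iff]
        omega
      rw [hdrop]
      have hmj : pvMJ (rs.take i) [] = rs.take i ++ [] := by
        cases hl : (rs.take i).getLast? <;> simp [pvMJ, hl]
      rw [hmj]
      unfold pvDelMerge
      rw [if_neg (by rintro ⟨_, h, _⟩; omega)]
      simp [List.map_take]
      omega

-- ---- the loops agree ----

theorem pv_i_lt (rs : List (Int × Nat)) (hne : rs ≠ []) :
    (if (pvCands rs).isEmpty then rs.length / 2 else pvPickMin rs.length (pvCands rs)) < rs.length := by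
  have h0 : 0 < rs.length := List.length_pos_iff.2 hne
  cases hcs : pvCands rs with
  | nil => simp; omega
  | cons a l =>
    simp only [List.isEmpty_cons, if_neg Bool.false_ne_true]
    have hpw := pv_cands_pairwise rs
    rw [hcs] at hpw
    obtain ⟨hmem, _⟩ := pv_pick_char rs.length l a (List.pairwise_cons.1 hpw).1 (List.pairwise_cons.1 hpw).2
    have hm : pvPickMin rs.length (a :: l) ∈ pvCands rs := by rw [hcs]; exact hmem
    have hf := (pv_cands_mem rs _).1 hm
    exact pv_flag_lt rs _ hf

theorem pvLoopB_cons_eq (f : Nat) (L : List (Int × Bool)) (acc : Int) (hL : L ≠ []) :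
    pvLoopB (f + 1) L acc
      = pvLoopB f (pvDelMerge L (pvSelect L L.length (L.length / 2)) L.length) (acc + 1) := by
  obtain ⟨a, t, rfl⟩ := List.exists_cons_of_ne_nil hL
  rfl

theorem pv_loop_eq (f : Nat) : ∀ (lst : List Int) (acc : Int),
    pvLoopA f lst acc = pvLoopB f ((pvBuildRuns lst).map pvAbs) acc := by
  induction f with
  | zero => intro lst acc; rfl
  | succ f ih =>
    intro lst acc
    cases lst with
    | nil => simp [pvLoopA, pvLoopB, pvBuildRuns]
    | cons x xs =>
      rw [pvLoopA]
      set rs := pvBuildRuns (x :: xs) with hrs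
      have hne : rs ≠ [] := by rw [hrs, pvBuildRuns]; simp
      have hg : pvGroupby (x :: xs) = rs.map pvRepl := pv_groupby_eq _
      rw [pvLoopB_cons_eq f _ acc (by simpa using hne)]
      simp only [hg, List.length_map]
      rw [pv_sel_eq rs hne]
      set i := (if ((rs.map pvRepl).zipIdx.filter (fun p => 1 < p.1.length)).map (·.2) |>.isEmpty
          then rs.length / 2
          else pvPickMin rs.length (((rs.map pvRepl).zipIdx.filter (fun p => 1 < p.1.length)).map (·.2))) with hi
      have hilt : i < rs.length := pv_i_lt rs hne
      have hflat : ((rs.map pvRepl).take i ++ (rs.map pvRepl).drop (i + 1)).flatten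
          = pvFlat (rs.take i) ++ pvFlat (rs.drop (i + 1)) := by
        simp [pvFlat, List.map_take, List.map_drop]
      rw [hflat, ih]
      congr 1
      rw [pv_M (rs.take i) (rs.drop (i + 1))
        ((pv_chain_buildRuns (x :: xs)).prefix (List.take_prefix _ _))
        ((pv_chain_buildRuns (x :: xs)).suffix (List.drop_suffix _ _))
        (fun p hp => pv_pos_buildRuns (x :: xs) p (List.mem_of_mem_take hp))
        (fun p hp => pv_pos_buildRuns (x :: xs) p (List.mem_of_mem_drop hp))]
      exact pv_del_eq rs i hilt (pv_pos_buildRuns (x :: xs))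

-- ===== VERDICT (by name: the statement is the Claim_ definition above) =====
theorem array_erasing_spec : Claim_equal_array_erasing := by
  intro lst _
  unfold Spec_array_erasing array_erasing array_erasing_alt
  rw [pv_build_fold_eq]
  exact pv_loop_eq lst.length lst 0
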